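-- pv_equiv track=rewrite | github.com/Nithin-Holla/MetaLifelongLanguage | models/cls_anml.py | group_by_class
-- ===== SOURCE A (Python) =====
-- from collections import defaultdict
--
-- def group_by_class(data_set, mini_batch_size):
--     grouped_text = defaultdict(list)
--     grouped_data_set = []
--     for txt, lbl in zip(data_set['text'], data_set['label']):
--         grouped_text[lbl].append(txt)
--     for lbl in grouped_text.keys():
--         for i in range(0, len(grouped_text[lbl]), mini_batch_size):
--             subset = grouped_text[lbl][i: i + mini_batch_size]
--             grouped_data_set.append((subset, [lbl] * len(subset)))
--     return grouped_data_set
-- ===== SOURCE B (Python) =====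
-- def group_by_class(data_set, mini_batch_size):
--     # Single pass: per-label batch lists are grown directly; no post-hoc slicing.
--     batches = {}
--     for txt, lbl in zip(data_set['text'], data_set['label']):
--         bl = batches.setdefault(lbl, [])
--         if bl and len(bl[-1]) < mini_batch_size:
--             bl[-1].append(txt)
--         else:
--             bl.append([txt])
--     return [(b, [lbl] * len(b)) for lbl, bl in batches.items() for b in bl]
-- ===== Notes on version B (the rewrite author's own statement) =====
-- stated objective: alternative
-- what changed: B builds each label's batches directly in one pass over zip(text,label) (appending to the label's last non-full batch or opening a new one), instead of A's two phases of grouping into flat per-label lists and then slicing them with a stepped range.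
-- outside the precondition, e.g. on group_by_class({'text': ['a'], 'label': ['x']}, -1): A returns [], B returns [(['a'], ['x'])]; on group_by_class({'text': ['a'], 'label': ['x']}, 0): A raises ValueError, B returns [(['a'], ['x'])]
import Mathlib
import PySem

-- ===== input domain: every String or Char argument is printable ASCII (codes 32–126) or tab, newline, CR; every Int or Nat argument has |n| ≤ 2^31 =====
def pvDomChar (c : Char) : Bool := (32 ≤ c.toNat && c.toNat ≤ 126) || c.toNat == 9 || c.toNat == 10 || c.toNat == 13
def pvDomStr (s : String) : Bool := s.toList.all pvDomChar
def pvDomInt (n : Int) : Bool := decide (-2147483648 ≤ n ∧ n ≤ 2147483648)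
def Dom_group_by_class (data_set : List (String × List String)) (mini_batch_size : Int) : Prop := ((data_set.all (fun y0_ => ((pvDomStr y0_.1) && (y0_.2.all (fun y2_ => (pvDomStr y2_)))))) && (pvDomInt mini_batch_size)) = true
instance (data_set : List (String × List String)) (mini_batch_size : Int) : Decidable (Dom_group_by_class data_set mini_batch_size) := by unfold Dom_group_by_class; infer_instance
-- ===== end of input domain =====

-- B groups and batches in ONE pass, growing each label's last batch directly (alternative decomposition, same cost).

-- ===== PORT A =====
def group_by_class (data_set : List (String × List String)) (mini_batch_size : Int) : List (List String × List String) :=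
  match (PySem.Dict.mk data_set).get? "text", (PySem.Dict.mk data_set).get? "label" with
  | some texts, some labels =>
      -- grouped_text = defaultdict(list); for txt, lbl in zip(...): grouped_text[lbl].append(txt)
      let grouped_text : PySem.Dict String (List String) :=
        (List.zip texts labels).foldl
          (fun d p => d.modify p.2 [] (fun v => v ++ [p.1])) PySem.Dict.empty
      -- for lbl in grouped_text.keys(): for i in range(0, len(...), mini_batch_size): append (subset, [lbl]*len(subset))
      grouped_text.keys.foldl
        (fun acc lbl =>
          (PySem.List.pyRange 0 ((grouped_text.getD lbl []).length : Int) mini_batch_size).foldl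
            (fun acc i =>
              let subset := PySem.List.slice (grouped_text.getD lbl []) (some i) (some (i + mini_batch_size))
              acc ++ [(subset, PySem.List.pyRepeat [lbl] (subset.length : Int))]) acc) []
  | _, _ => []

-- ===== PORT B =====
-- if bl and len(bl[-1]) < mini_batch_size: bl[-1].append(txt) else: bl.append([txt])
def pvAddBatch (s : Int) (bl : List (List String)) (txt : String) : List (List String) :=
  match bl.getLast? with
  | some last => if (last.length : Int) < s then bl.dropLast ++ [last ++ [txt]] else bl ++ [[txt]]
  | none => [[txt]]

def group_by_class_alt (data_set : List (String × List String)) (mini_batch_size : Int) : List (List String × List String) :=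
  match (PySem.Dict.mk data_set).get? "text" with
  | none => []
  | some texts =>
    match (PySem.Dict.mk data_set).get? "label" with
    | none => []
    | some labels =>
      let batches : PySem.Dict String (List (List String)) :=
        (List.zip texts labels).foldl
          (fun d p => d.modify p.2 [] (fun bl => pvAddBatch mini_batch_size bl p.1)) PySem.Dict.empty
      batches.items.flatMap (fun q => q.2.map (fun b => (b, List.replicate b.length q.1)))

-- ===== PRECONDITION & SPEC =====
-- Pre_ excludes inputs where A raises (missing 'text'/'label' key: KeyError; mini_batch_size = 0: ValueError from range),
-- and mini_batch_size < 0, a nonsense batch size on which A's negative range step silently yields [] while B yields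
-- singleton batches — neither value is specified behaviour, so that corner is left unclaimed.
def Pre_group_by_class (data_set : List (String × List String)) (mini_batch_size : Int) : Prop :=
  ((PySem.Dict.mk data_set).get? "text").isSome = true ∧
  ((PySem.Dict.mk data_set).get? "label").isSome = true ∧
  1 ≤ mini_batch_size
instance (data_set : List (String × List String)) (mini_batch_size : Int) : Decidable (Pre_group_by_class data_set mini_batch_size) := by unfold Pre_group_by_class; infer_instance

def pvWitness_group_by_class : (List (String × List String)) × Int :=
  ([("text", ["a", "b", "c"]), ("label", ["x", "y", "x"])], 2)

def Spec_group_by_class (data_set : List (String × List String)) (mini_batch_size : Int) (out : List (List String × List String)) : Prop := out = group_by_class_alt data_set mini_batch_size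
instance (data_set : List (String × List String)) (mini_batch_size : Int) (out : List (List String × List String)) : Decidable (Spec_group_by_class data_set mini_batch_size out) := by unfold Spec_group_by_class; infer_instance

-- ===== CLAIM (what is proved, stated in full; the proofs are below) =====
def Claim_equal_group_by_class : Prop := ∀ (data_set : List (String × List String)) (mini_batch_size : Int), Dom_group_by_class data_set mini_batch_size → Pre_group_by_class data_set mini_batch_size → Spec_group_by_class data_set mini_batch_size (group_by_class data_set mini_batch_size)


-- ===== LEMMAS AND PROOFS =====

-- chunks of size k+1, front to back (the common shape both ports are reduced to)
def pvChunks {α : Type} (k : Nat) : List α → List (List α)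
  | [] => []
  | x :: xs => (x :: xs.take k) :: pvChunks k (xs.drop k)
  termination_by l => l.length
  decreasing_by simp only [List.length_drop, List.length_cons]; omega

lemma pvChunks_ne_nil {α : Type} (k : Nat) (x : α) (xs : List α) : pvChunks k (x :: xs) ≠ [] := by
  simp [pvChunks]

lemma pvAddBatch_cons (s : Int) (c : List String) (rest : List (List String)) (t : String)
    (h : rest ≠ []) : pvAddBatch s (c :: rest) t = c :: pvAddBatch s rest t := by
  cases rest with
  | nil => exact absurd rfl h
  | cons r rs =>
    unfold pvAddBatch
    rw [List.getLast?_cons_cons]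
    cases hl : (r :: rs).getLast? with
    | none => simp at hl
    | some last =>
      by_cases hlt : ((last.length : Int) < s)
      · simp [hlt]
      · simp [hlt]

lemma pvAddBatch_chunks (k : Nat) (t : String) : ∀ ts : List String,
    pvAddBatch ((k : Int) + 1) (pvChunks k ts) t = pvChunks k (ts ++ [t]) := by
  intro ts
  induction hn : ts.length using Nat.strong_induction_on generalizing ts with
  | _ n ih =>
  cases ts with
  | nil => simp [pvChunks, pvAddBatch]
  | cons x xs =>
    by_cases hlen : xs.length < k
    · -- whole list is one non-full chunk
      have ht : xs.take k = xs := List.take_of_length_le (by omega)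
      have hd : xs.drop k = [] := List.drop_eq_nil_of_le (by omega)
      have ht' : (xs ++ [t]).take k = xs ++ [t] := List.take_of_length_le (by simp; omega)
      have hd' : (xs ++ [t]).drop k = [] := List.drop_eq_nil_of_le (by simp; omega)
      simp [pvChunks, ht, hd, ht', hd', pvAddBatch]
      omega
    · by_cases heq : xs.length = k
      · -- exactly one full chunk
        have ht : xs.take k = xs := List.take_of_length_le (by omega)
        have hd : xs.drop k = [] := List.drop_eq_nil_of_le (by omega)
        have ht' : (xs ++ [t]).take k = xs := by rw [List.take_append_of_le_length (by omega), ht]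
        have hd' : (xs ++ [t]).drop k = [t] := by rw [List.drop_append_of_le_length (by omega), hd]; simp
        simp [pvChunks, ht, hd, ht', hd', pvAddBatch]
        omega
      · -- more than one chunk: head chunk is full, recurse
        have hgt : k < xs.length := by omega
        have ht' : (xs ++ [t]).take k = xs.take k := List.take_append_of_le_length (by omega)
        have hd' : (xs ++ [t]).drop k = xs.drop k ++ [t] := List.drop_append_of_le_length (by omega)
        have hne : xs.drop k ≠ [] := by
          intro hcon
          have := List.length_drop (l := xs) (i := k)
          rw [hcon] at this
          simp at this
          omega
        obtain ⟨y, ys, hys⟩ := List.exists_cons_of_ne_nil hne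
        rw [show (x :: xs) ++ [t] = x :: (xs ++ [t]) by simp]
        rw [pvChunks, pvChunks, ht', hd', hys]
        rw [pvAddBatch_cons _ _ _ _ (pvChunks_ne_nil _ _ _)]
        have hn' : xs.length + 1 = n := by simpa using hn
        rw [← hys, ih (xs.drop k).length (by rw [List.length_drop]; omega) _ rfl]

lemma pvBuild_eq_chunks (k : Nat) (ts : List String) :
    ts.foldl (pvAddBatch ((k : Int) + 1)) [] = pvChunks k ts := by
  induction ts using List.reverseRecOn with
  | nil => simp [pvChunks]
  | append_singleton ts t ih =>
      rw [List.foldl_append, List.foldl_cons, List.foldl_nil, ih, pvAddBatch_chunks]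

lemma pvRange_cons (s n : Int) (hs : 0 < s) (hn : 0 < n) :
    PySem.List.pyRange 0 n s = 0 :: (PySem.List.pyRange 0 (n - s) s).map (· + s) := by
  rw [PySem.List.pyRange_of_pos _ _ hs, PySem.List.pyRange_of_pos _ _ hs]
  have hq : 0 ≤ (n - 1) / s := Int.ediv_nonneg (by omega) (by omega)
  have h1 : (n - 0 + s - 1) / s = (n - 1) / s + 1 := by
    rw [show n - 0 + s - 1 = (n - 1) + 1 * s by ring, Int.add_mul_ediv_right _ _ (by omega)]
  have h2 : ((n - 0 + s - 1) / s).toNat = ((n - 1) / s).toNat + 1 := by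
    rw [h1]; omega
  by_cases hm : 0 < n - s
  · have h3 : (n - s - 0 + s - 1) / s = (n - 1) / s := by ring_nf
    simp only [if_pos hn, if_pos hm, h2, h3, List.range_succ_eq_map, List.map_map]
    refine List.cons_eq_cons.mpr ⟨by norm_num, ?_⟩
    rw [List.map_map]
    refine List.map_congr_left (fun a ha => ?_)
    simp only [Function.comp_apply]
    push_cast
    ring
  · have h4 : (n - 1) / s = 0 := Int.ediv_eq_zero_of_lt (by omega) (by omega)
    simp only [if_pos hn, if_neg hm, h2, h4, List.range_succ_eq_map, List.map_map]
    simp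

lemma pvMapSlice (k : Nat) : ∀ ts : List String,
    (PySem.List.pyRange 0 (ts.length : Int) ((k : Int) + 1)).map
      (fun i => PySem.List.slice ts (some i) (some (i + ((k : Int) + 1)))) = pvChunks k ts := by
  intro ts
  induction hn : ts.length using Nat.strong_induction_on generalizing ts with
  | _ n ih =>
  subst hn
  cases ts with
  | nil => simp [pvChunks, PySem.List.pyRange_of_pos _ _ (by omega : (0:Int) < (k:Int)+1)]
  | cons x xs =>
    have hlc : (x :: xs).length = xs.length + 1 := rfl
    have hpos : (0:Int) < ((x :: xs).length : Int) := by simp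
    rw [pvRange_cons _ _ (by omega) hpos, List.map_cons, List.map_map]
    have hhead : PySem.List.slice (x :: xs) (some 0) (some (0 + ((k:Int)+1))) = x :: xs.take k := by
      rw [zero_add, PySem.List.slice_toNat _ le_rfl (by omega)]
      simp only [Int.toNat_zero, List.drop_zero, Nat.sub_zero]
      rw [show ((k:Int)+1).toNat = k+1 by omega]
      simp [List.take_succ_cons]
    rw [pvChunks, ← hhead]
    congr 1
    have hshift : ∀ i : Int, 0 ≤ i →
        PySem.List.slice (x :: xs) (some (i + ((k:Int)+1))) (some (i + ((k:Int)+1) + ((k:Int)+1)))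
        = PySem.List.slice (xs.drop k) (some i) (some (i + ((k:Int)+1))) := by
      intro i hi
      rw [PySem.List.slice_toNat (x :: xs) (by omega : (0:Int) ≤ i + ((k:Int)+1)) (by omega : (0:Int) ≤ i + ((k:Int)+1) + ((k:Int)+1)), PySem.List.slice_toNat (xs.drop k) hi (by omega : (0:Int) ≤ i + ((k:Int)+1))]
      rw [show (i + ((k:Int)+1)).toNat = (k + i.toNat) + 1 by omega, List.drop_succ_cons, List.drop_drop]
      congr 1
      omega
    calc List.map ((fun i => PySem.List.slice (x :: xs) (some i) (some (i + ((k:Int)+1)))) ∘ (· + ((k:Int)+1)))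
          (PySem.List.pyRange 0 (((x :: xs).length : Int) - ((k:Int)+1)) ((k:Int)+1))
        = List.map (fun i => PySem.List.slice (xs.drop k) (some i) (some (i + ((k:Int)+1))))
          (PySem.List.pyRange 0 (((xs.drop k).length : Int)) ((k:Int)+1)) := by
          by_cases hlong : (k:Int) + 1 ≤ ((x :: xs).length : Int)
          · have harg : ((x :: xs).length : Int) - ((k:Int)+1) = ((xs.drop k).length : Int) := by
              simp [List.length_drop]
              omega
            rw [harg]
            refine List.map_congr_left ?_
            intro i hi
            have hi0 : 0 ≤ i := ((PySem.List.mem_pyRange_iff_of_pos (by omega) i).mp hi).1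
            exact hshift i hi0
          · have h1 : ((x :: xs).length : Int) - ((k:Int)+1) ≤ 0 := by omega
            have h2 : ((xs.drop k).length : Int) ≤ 0 := by
              rw [List.length_drop]
              omega
            rw [PySem.List.pyRange_of_pos _ _ (by omega : (0:Int) < (k:Int)+1),
                PySem.List.pyRange_of_pos _ _ (by omega : (0:Int) < (k:Int)+1)]
            rw [if_neg (by omega), if_neg (by omega)]
            simp
      _ = pvChunks k (xs.drop k) := by
          exact ih (xs.drop k).length (by rw [List.length_drop]; omega) _ rfl


lemma pvGroup_invariant (s : Int) (pairs : List (String × String)) :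
    ∀ (dG : PySem.Dict String (List String)) (dH : PySem.Dict String (List (List String))),
    (∀ l, dH.getD l [] = (dG.getD l []).foldl (pvAddBatch s) []) →
    ∀ l, (pairs.foldl (fun d p => d.modify p.2 [] (fun bl => pvAddBatch s bl p.1)) dH).getD l []
       = ((pairs.foldl (fun d p => d.modify p.2 [] (fun v => v ++ [p.1])) dG).getD l []).foldl (pvAddBatch s) [] := by
  induction pairs with
  | nil => intro dG dH h l; exact h l
  | cons p ps ih =>
      intro dG dH h l
      simp only [List.foldl_cons]
      refine ih _ _ ?_ l
      intro l'
      rw [PySem.Dict.getD_modify, PySem.Dict.getD_modify]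
      by_cases he : l' = p.2
      · rw [if_pos he, if_pos he, List.foldl_append, List.foldl_cons, List.foldl_nil, h p.2]
      · rw [if_neg he, if_neg he]; exact h l'

lemma pvKeys_eq (s : Int) (pairs : List (String × String)) :
    (pairs.foldl (fun d p => d.modify p.2 [] (fun bl => pvAddBatch s bl p.1)) (PySem.Dict.empty : PySem.Dict String (List (List String)))).keys
  = (pairs.foldl (fun d p => d.modify p.2 [] (fun v => v ++ [p.1])) (PySem.Dict.empty : PySem.Dict String (List String))).keys := by
  rw [PySem.Dict.keys_foldl_modify_key pairs (fun p => p.2) [] (fun _ p => fun bl => pvAddBatch s bl p.1) _,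
      PySem.Dict.keys_foldl_modify_key pairs (fun p => p.2) [] (fun _ p => fun v => v ++ [p.1]) _]
  simp [PySem.Dict.keys_empty]

lemma pvNodupH (s : Int) (pairs : List (String × String)) :
    (pairs.foldl (fun d p => d.modify p.2 [] (fun bl => pvAddBatch s bl p.1)) (PySem.Dict.empty : PySem.Dict String (List (List String)))).keys.Nodup :=
  PySem.Dict.nodup_keys_foldl_modify_key pairs (fun p => p.2) [] (fun _ p => fun bl => pvAddBatch s bl p.1) _ (by simp [PySem.Dict.keys_empty])

lemma pvFlatMapSingleton {α β : Type} (F : α → β) (l : List α) :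
    (l.flatMap fun i => [F i]) = l.map F := by
  induction l <;> simp_all

lemma pvFlatMapMap {α β γ : Type} (f : α → β) (g : β → List γ) (l : List α) :
    (l.map f).flatMap g = l.flatMap (fun x => g (f x)) := by
  induction l <;> simp_all

lemma pvFlatMapCongr {α β : Type} (f g : α → List β) (l : List α) (h : ∀ x, f x = g x) :
    l.flatMap f = l.flatMap g := by
  induction l <;> simp_all

-- ===== VERDICT (by name: the statement is the Claim_ definition above) =====
theorem group_by_class_spec : Claim_equal_group_by_class := by
  intro ds s _ hpre
  obtain ⟨h1, h2, hs⟩ := hpre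
  obtain ⟨texts, hx⟩ := Option.isSome_iff_exists.mp h1
  obtain ⟨labels, hy⟩ := Option.isSome_iff_exists.mp h2
  obtain ⟨k, rfl⟩ : ∃ k : Nat, s = (k : Int) + 1 := ⟨(s - 1).toNat, by omega⟩
  unfold Spec_group_by_class group_by_class group_by_class_alt
  rw [hx, hy]
  simp only [PySem.List.foldl_append_eq_flatMap]
  have hkeys : ((texts.zip labels).foldl (fun d p => d.modify p.2 [] fun bl => pvAddBatch ((k:Int)+1) bl p.1) PySem.Dict.empty).keys
      = ((texts.zip labels).foldl (fun d p => d.modify p.2 [] fun v => v ++ [p.1]) PySem.Dict.empty).keys :=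
    pvKeys_eq ((k:Int)+1) (texts.zip labels)
  rw [PySem.Dict.items_eq_map_keys _ (pvNodupH ((k:Int)+1) (texts.zip labels)) [], hkeys]
  rw [pvFlatMapMap, List.nil_append]
  refine pvFlatMapCongr _ _ _ (fun lbl => ?_)
  have hH1 : ((texts.zip labels).foldl (fun d p => d.modify p.2 [] fun bl => pvAddBatch ((k:Int)+1) bl p.1) PySem.Dict.empty).getD lbl []
      = (((texts.zip labels).foldl (fun d p => d.modify p.2 [] fun v => v ++ [p.1]) PySem.Dict.empty).getD lbl []).foldl (pvAddBatch ((k:Int)+1)) [] :=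
    pvGroup_invariant ((k:Int)+1) (texts.zip labels) PySem.Dict.empty PySem.Dict.empty (fun l => by simp [PySem.Dict.getD_empty]) lbl
  simp only [hH1, pvBuild_eq_chunks]
  rw [← pvMapSlice k, pvFlatMapSingleton, List.map_map]
  refine List.map_congr_left (fun i hi => ?_)
  simp [PySem.List.pyRepeat_singleton]
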